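-- pv_equiv track=rewrite | github.com/aelaguiz/doctrine | doctrine/_compiler/validate/__init__.py | _enumerate_review_contract_failure_states
-- ===== SOURCE A (Python) =====
-- def _enumerate_review_contract_failure_states(
--
--     gate_ids: tuple[str, ...],
-- ) -> tuple[tuple[str, ...], ...]:
--     states: list[tuple[str, ...]] = [()]
--     for gate_id in gate_ids:
--         next_states: list[tuple[str, ...]] = []
--         for state in states:
--             next_states.append(state)
--             next_states.append((*state, gate_id))
--         states = next_states
--     return tuple(states)
-- ===== SOURCE B (Python) =====
-- def _enumerate_review_contract_failure_states(
--     gate_ids: tuple[str, ...],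
-- ) -> tuple[tuple[str, ...], ...]:
--     n = len(gate_ids)
--     return tuple(
--         tuple(g for j, g in enumerate(gate_ids) if (i >> (n - 1 - j)) & 1)
--         for i in range(1 << n)
--     )
-- ===== Notes on version B (the rewrite author's own statement) =====
-- stated objective: alternative
-- what changed: Replaced A's incremental list-doubling (rebuilding the whole state list once per gate) by direct bitmask enumeration: subset i of range(2^n) contains gate_ids[j] iff bit n-1-j of i is set, yielding the identical sequence of subsets.
import Mathlib
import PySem

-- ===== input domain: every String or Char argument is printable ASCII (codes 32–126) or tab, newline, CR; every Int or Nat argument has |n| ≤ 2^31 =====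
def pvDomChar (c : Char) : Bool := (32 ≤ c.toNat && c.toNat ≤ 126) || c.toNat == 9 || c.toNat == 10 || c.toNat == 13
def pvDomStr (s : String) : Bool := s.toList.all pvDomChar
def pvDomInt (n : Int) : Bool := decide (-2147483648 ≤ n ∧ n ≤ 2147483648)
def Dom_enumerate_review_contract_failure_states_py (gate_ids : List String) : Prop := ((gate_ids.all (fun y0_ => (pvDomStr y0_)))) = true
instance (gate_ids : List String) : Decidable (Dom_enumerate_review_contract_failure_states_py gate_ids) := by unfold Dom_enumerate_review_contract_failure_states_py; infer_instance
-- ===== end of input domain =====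

-- B replaces A's incremental doubling of the state list by direct bitmask enumeration
-- (subset i of range(2^n) picks gate_ids[j] iff bit n-1-j of i is set); objective: alternative.


-- ===== PORT A =====
-- inner loop: next_states.append(state); next_states.append((*state, gate_id))
def erc_step (states : List (List String)) (gate_id : String) : List (List String) :=
  states.foldl (fun next_states state => next_states ++ [state, state ++ [gate_id]]) []

def enumerate_review_contract_failure_states_py (gate_ids : List String) : List (List String) :=
  gate_ids.foldl erc_step [[]]

-- ===== PORT B =====
-- tuple(g for j, g in enumerate(gate_ids) if (i >> (n - 1 - j)) & 1)
def erc_mask (n : Nat) (gate_ids : List String) (i : Nat) : List String :=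
  (PySem.List.enumerate gate_ids).filterMap (fun jg =>
    if (i >>> (n - 1 - jg.1.toNat)) &&& 1 == 1 then some jg.2 else none)

-- range(1 << n) yields the nonnegative ints 0..2^n-1, ported exactly as List.range (2^n) over Nat
def enumerate_review_contract_failure_states_py_alt (gate_ids : List String) : List (List String) :=
  let n := gate_ids.length
  (List.range (2 ^ n)).map (erc_mask n gate_ids)

-- ===== PRECONDITION & SPEC =====
def Spec_enumerate_review_contract_failure_states_py (gate_ids : List String) (out : List (List String)) : Prop := out = enumerate_review_contract_failure_states_py_alt gate_ids
instance (gate_ids : List String) (out : List (List String)) : Decidable (Spec_enumerate_review_contract_failure_states_py gate_ids out) := by unfold Spec_enumerate_review_contract_failure_states_py; infer_instance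

-- ===== CLAIM (what is proved, stated in full; the proofs are below) =====
def Claim_equal_enumerate_review_contract_failure_states_py : Prop := ∀ (gate_ids : List String), Dom_enumerate_review_contract_failure_states_py gate_ids → Spec_enumerate_review_contract_failure_states_py gate_ids (enumerate_review_contract_failure_states_py gate_ids)

-- ===== LEMMAS AND PROOFS =====

-- A's inner loop is a flatMap
theorem erc_step_eq (states : List (List String)) (g : String) :
    erc_step states g = states.flatMap (fun s => [s, s ++ [g]]) := by
  unfold erc_step
  simpa using PySem.List.foldl_append_eq_flatMap (fun s => [s, s ++ [g]]) states []

-- increasing the width by one shifts the mask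
theorem erc_mask_succ (m : Nat) (xs : List String) (i : Nat) (h : xs.length ≤ m) :
    erc_mask (m + 1) xs i = erc_mask m xs (i >>> 1) := by
  unfold erc_mask
  apply List.filterMap_congr
  intro jg hjg
  obtain ⟨k, hk, rfl⟩ := (PySem.List.mem_enumerate_iff xs 0 jg).1 hjg
  have hkm : k < m := lt_of_lt_of_le hk h
  have h1 : (m + 1) - 1 - ((0 : Int) + (k : Nat)).toNat = (m - 1 - k) + 1 := by
    simp; omega
  have h2 : m - 1 - ((0 : Int) + (k : Nat)).toNat = m - 1 - k := by simp
  rw [h1, h2]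
  have : i >>> (m - 1 - k + 1) = (i >>> 1) >>> (m - 1 - k) := by
    rw [Nat.add_comm, Nat.shiftRight_add]
  rw [this]

-- appending one gate appends (or not) that gate to each subset, by the low bit
theorem erc_mask_concat (n : Nat) (xs : List String) (g : String) (i : Nat) :
    erc_mask n (xs ++ [g]) i =
      erc_mask n xs i ++ (if (i >>> (n - 1 - xs.length)) &&& 1 == 1 then [g] else []) := by
  unfold erc_mask
  rw [PySem.List.enumerate_append, List.filterMap_append]
  congr 1
  simp [PySem.List.enumerate_cons, PySem.List.enumerate_nil]
  split <;> simp_all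

-- mapping over range(2m) is a flatMap of even/odd pairs over range(m)
theorem range_double_map {β : Type} (f : Nat → β) (m : Nat) :
    (List.range (2 * m)).map f = (List.range m).flatMap (fun k => [f (2 * k), f (2 * k + 1)]) := by
  induction m with
  | zero => simp
  | succ m ih =>
    have h2 : 2 * (m + 1) = (2 * m + 1) + 1 := by ring
    rw [h2, List.range_succ, List.range_succ, List.range_succ]
    simp [ih]

theorem shift_even (k : Nat) : (2 * k) >>> 1 = k := by
  simp [Nat.shiftRight_one]

theorem shift_odd (k : Nat) : (2 * k + 1) >>> 1 = k := by
  simp [Nat.shiftRight_one]; omega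

theorem erc_key (xs : List String) :
    xs.foldl erc_step [[]] = (List.range (2 ^ xs.length)).map (erc_mask xs.length xs) := by
  induction xs using List.reverseRecOn with
  | nil => simp [erc_mask]
  | append_singleton xs g ih =>
    rw [List.foldl_append, List.foldl_cons, List.foldl_nil, ih, erc_step_eq]
    rw [List.flatMap_map]
    have hlen : (xs ++ [g]).length = xs.length + 1 := by simp
    rw [hlen, pow_succ, Nat.mul_comm, range_double_map]
    apply List.flatMap_congr
    intro k _
    have h0 : xs.length + 1 - 1 - xs.length = 0 := by omega
    rw [erc_mask_concat, erc_mask_concat, erc_mask_succ _ _ _ (le_refl _),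
        erc_mask_succ _ _ _ (le_refl _), h0]
    simp [Nat.shiftRight_zero, shift_even, shift_odd]

-- ===== VERDICT (by name: the statement is the Claim_ definition above) =====
theorem enumerate_review_contract_failure_states_py_spec : Claim_equal_enumerate_review_contract_failure_states_py := by
  intro gate_ids _
  unfold Spec_enumerate_review_contract_failure_states_py
  unfold enumerate_review_contract_failure_states_py enumerate_review_contract_failure_states_py_alt
  exact erc_key gate_ids
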